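-- pv_equiv track=rewrite | github.com/Pet3r1512/Source-Code | Essay.py | calculate
-- ===== SOURCE A (Python) =====
-- def calculate(a, b, operator):
--     list = []
--     if operator == "&":
--         for index in range(len(a)):
--             list.append(a[index] and b[index])
--     if operator == "|":
--         for index in range(len(a)):
--             list.append(a[index] or b[index])
--     if operator == ">":
--         for index in range(len(a)):
--             if a[index]:
--                 list.append(b[index])
--             else:
--                 list.append(True)
--     if operator == "=":
--         for index in range(len(a)):
--             list.append(a[index] == b[index])
--     return list
-- ===== SOURCE B (Python) =====
-- # Truth-table approach: each operator is a precomputed 4-entry truth table,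
-- # indexed arithmetically by 2*a[i] + b[i]; no boolean operators at all.
-- _TABLES = {
--     "&": (False, False, False, True),
--     "|": (False, True, True, True),
--     ">": (True, True, False, True),
--     "=": (True, False, False, True),
-- }
--
-- def calculate(a, b, operator):
--     table = _TABLES.get(operator)
--     if table is None:
--         return []
--     return [table[2 * a[i] + b[i]] for i in range(len(a))]
-- ===== Notes on version B (the rewrite author's own statement) =====
-- stated objective: alternative
-- what changed: Replaces A's four sequential if-blocks with hand-written boolean logic per element by a precomputed 4-entry truth table per operator, looked up once and indexed arithmetically by 2*a[i]+b[i] in a single comprehension; no boolean operator appears in B.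
-- outside the precondition, e.g. on calculate([False], [], '&'): A returns [False], B raises IndexError; on calculate([False], [], '>'): A returns [True], B raises IndexError; on calculate([True], [], '|'): A returns [True], B raises IndexError
import Mathlib
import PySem

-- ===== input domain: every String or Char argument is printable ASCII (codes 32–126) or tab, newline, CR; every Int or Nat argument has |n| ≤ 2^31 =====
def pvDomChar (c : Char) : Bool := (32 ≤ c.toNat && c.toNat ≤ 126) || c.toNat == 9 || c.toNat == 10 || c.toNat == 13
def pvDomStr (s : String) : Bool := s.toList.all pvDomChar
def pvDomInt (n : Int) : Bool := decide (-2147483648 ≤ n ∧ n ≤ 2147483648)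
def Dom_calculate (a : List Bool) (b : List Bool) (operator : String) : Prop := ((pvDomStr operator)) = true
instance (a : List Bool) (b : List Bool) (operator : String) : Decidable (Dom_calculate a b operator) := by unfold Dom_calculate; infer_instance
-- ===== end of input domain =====

-- B derives each operator from a precomputed 4-entry truth table indexed by 2*a[i]+b[i],
-- instead of A's four if-blocks of hand-written boolean logic (objective: alternative).

-- ===== PORT A =====
-- Four sequential `if` blocks, each a loop appending to the accumulator list.
-- Indexing a[index]/b[index] is in range under Pre_; ported as getD.
def calculate (a : List Bool) (b : List Bool) (operator : String) : List Bool :=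
  let l : List Bool := []
  let l := if operator = "&" then
      (List.range a.length).foldl (fun acc i => acc ++ [a.getD i false && b.getD i false]) l
    else l
  let l := if operator = "|" then
      (List.range a.length).foldl (fun acc i => acc ++ [a.getD i false || b.getD i false]) l
    else l
  let l := if operator = ">" then
      (List.range a.length).foldl
        (fun acc i => if a.getD i false then acc ++ [b.getD i false] else acc ++ [true]) l
    else l
  let l := if operator = "=" then
      (List.range a.length).foldl (fun acc i => acc ++ [a.getD i false == b.getD i false]) l
    else l
  l

-- ===== PORT B =====
-- Source B's operator → 4-entry truth-table dict.
def pvTruthTables : PySem.Dict String (List Bool) :=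
  PySem.Dict.ofList
    [("&", [false, false, false, true]),
     ("|", [false, true, true, true]),
     (">", [true, true, false, true]),
     ("=", [true, false, false, true])]

-- table[2*a[i]+b[i]]; the index is always 0..3, in range of the 4-entry table.
def calculate_alt (a : List Bool) (b : List Bool) (operator : String) : List Bool :=
  match PySem.Dict.get? pvTruthTables operator with
  | none => []
  | some t => (List.range a.length).map (fun i =>
      t.getD (2 * (if a.getD i false then 1 else 0) + (if b.getD i false then 1 else 0)) false)

-- ===== PRECONDITION & SPEC =====
-- Pre_ excludes inputs where b is shorter than a with a recognized operator: there A raises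
-- IndexError unless Python's short-circuit `and`/`or` (or a false a[index] under '>') happens to
-- skip every out-of-range b[index] — an artefact of evaluation order that B's uniform indexing
-- turns into an IndexError.
def Pre_calculate (a : List Bool) (b : List Bool) (operator : String) : Prop :=
  (operator = "&" ∨ operator = "|" ∨ operator = ">" ∨ operator = "=") → a.length ≤ b.length
instance (a : List Bool) (b : List Bool) (operator : String) : Decidable (Pre_calculate a b operator) := by unfold Pre_calculate; infer_instance
def pvWitness_calculate : List Bool × List Bool × String := ([true, false], [false, true], "&")
def Spec_calculate (a : List Bool) (b : List Bool) (operator : String) (out : List Bool) : Prop := out = calculate_alt a b operator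
instance (a : List Bool) (b : List Bool) (operator : String) (out : List Bool) : Decidable (Spec_calculate a b operator out) := by unfold Spec_calculate; infer_instance

-- ===== CLAIM (what is proved, stated in full; the proofs are below) =====
def Claim_equal_calculate : Prop := ∀ (a : List Bool) (b : List Bool) (operator : String), Dom_calculate a b operator → Pre_calculate a b operator → Spec_calculate a b operator (calculate a b operator)

-- ===== LEMMAS AND PROOFS =====
theorem pv_get_amp : pvTruthTables.get? "&" = some [false, false, false, true] := rfl
theorem pv_get_bar : pvTruthTables.get? "|" = some [false, true, true, true] := rfl
theorem pv_get_gt : pvTruthTables.get? ">" = some [true, true, false, true] := rfl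
theorem pv_get_eq : pvTruthTables.get? "=" = some [true, false, false, true] := rfl

theorem pv_items : pvTruthTables.items =
    [("&", [false, false, false, true]), ("|", [false, true, true, true]),
     (">", [true, true, false, true]), ("=", [true, false, false, true])] := rfl

theorem pv_get_none (op : String) (h1 : op ≠ "&") (h2 : op ≠ "|") (h3 : op ≠ ">") (h4 : op ≠ "=") :
    pvTruthTables.get? op = none := by
  simp [PySem.Dict.get?, pv_items, List.find?,
    beq_eq_false_iff_ne.mpr h1.symm, beq_eq_false_iff_ne.mpr h2.symm,
    beq_eq_false_iff_ne.mpr h3.symm, beq_eq_false_iff_ne.mpr h4.symm]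

theorem pv_foldl_append_if (l : List Nat) (s : List Bool) (p : Nat → Bool) (g : Nat → Bool) :
    l.foldl (fun acc i => if p i then acc ++ [g i] else acc ++ [true]) s
      = s ++ l.map (fun i => if p i then g i else true) := by
  induction l generalizing s with
  | nil => simp
  | cons x xs ih =>
    simp only [List.foldl, List.map]
    by_cases h : p x = true <;> simp [h, ih]

theorem pv_flatten_singleton (l : List Nat) (f : Nat → Bool) :
    (l.map (fun i => [f i])).flatten = l.map f := by
  induction l with
  | nil => rfl
  | cons x xs ih => simp [ih]

-- ===== VERDICT (by name: the statement is the Claim_ definition above) =====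
theorem calculate_spec : Claim_equal_calculate := by
  intro a b operator _ _
  unfold Spec_calculate
  by_cases h1 : operator = "&"
  · subst h1
    simp only [calculate, calculate_alt, pv_get_amp]
    simp [pv_flatten_singleton]
    intro i _
    cases ha : a[i]?.getD false <;> cases hb : b[i]?.getD false <;> simp [ha, hb]
  by_cases h2 : operator = "|"
  · subst h2
    simp only [calculate, calculate_alt, pv_get_bar]
    simp [pv_flatten_singleton]
    intro i _
    cases ha : a[i]?.getD false <;> cases hb : b[i]?.getD false <;> simp [ha, hb]
  by_cases h3 : operator = ">"
  · subst h3
    simp only [calculate, calculate_alt, pv_get_gt, pv_foldl_append_if, List.nil_append,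
      if_neg h1, if_neg h2]
    rw [if_neg (by decide : ¬(">" : String) = "=")]
    refine List.map_congr_left fun i _ => ?_
    cases ha : a.getD i false <;> cases hb : b.getD i false <;> simp [ha, hb]
  by_cases h4 : operator = "="
  · subst h4
    simp only [calculate, calculate_alt, pv_get_eq]
    simp [pv_flatten_singleton]
    intro i _
    cases ha : a[i]?.getD false <;> cases hb : b[i]?.getD false <;> simp [ha, hb]
  · simp [calculate, calculate_alt, h1, h2, h3, h4, pv_get_none operator h1 h2 h3 h4]
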